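-- pv_equiv track=rewrite | github.com/sinhakrishnendu/babappasnake | babappasnake/scripts/extract_selected_branch_ancestors.py | detect_signif_key
-- ===== SOURCE A (Python) =====
-- SIGNIF_KEYS = ("significant_BH_0.05", "significant_BH_0.1", "significant_BH")
--
-- def detect_signif_key(rows: list[dict[str, str]]) -> str | None:
--     keys = {k for row in rows for k in row.keys()}
--     for key in SIGNIF_KEYS:
--         if key in keys:
--             return key
--     for key in sorted(keys):
--         if key.startswith("significant_BH_"):
--             return key
--     return None
-- ===== SOURCE B (Python) =====
-- SIGNIF_KEYS = ("significant_BH_0.05", "significant_BH_0.1", "significant_BH")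
--
-- def detect_signif_key(rows: list[dict[str, str]]) -> str | None:
--     # single pass: record which priority keys occur and track the running
--     # lexicographic minimum of keys starting with "significant_BH_"
--     f05 = f01 = fbh = False
--     best = None
--     for row in rows:
--         for k in row.keys():
--             f05 = f05 or k == "significant_BH_0.05"
--             f01 = f01 or k == "significant_BH_0.1"
--             fbh = fbh or k == "significant_BH"
--             if k.startswith("significant_BH_") and (best is None or k < best):
--                 best = k
--     if f05:
--         return "significant_BH_0.05"
--     if f01:
--         return "significant_BH_0.1"
--     if fbh:
--         return "significant_BH"
--     return best
-- ===== Notes on version B (the rewrite author's own statement) =====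
-- stated objective: alternative
-- what changed: Replaces A's build-a-set / priority-scan / sort-then-scan-for-prefix pipeline with a single pass over all keys that records the three priority flags and tracks a running lexicographic minimum of the prefix-matching keys, deciding at the end; no set and no sort.
import Mathlib
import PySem

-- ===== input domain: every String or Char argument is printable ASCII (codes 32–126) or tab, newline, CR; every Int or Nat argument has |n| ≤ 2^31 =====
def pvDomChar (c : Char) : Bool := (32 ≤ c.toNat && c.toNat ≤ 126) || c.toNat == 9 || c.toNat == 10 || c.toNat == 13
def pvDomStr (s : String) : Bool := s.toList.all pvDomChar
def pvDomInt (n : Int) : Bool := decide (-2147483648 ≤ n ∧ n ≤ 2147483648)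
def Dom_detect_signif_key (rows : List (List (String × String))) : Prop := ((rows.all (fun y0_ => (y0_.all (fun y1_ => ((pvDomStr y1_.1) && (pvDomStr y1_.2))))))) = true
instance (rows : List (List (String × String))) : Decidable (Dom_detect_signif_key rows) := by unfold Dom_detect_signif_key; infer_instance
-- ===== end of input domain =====

-- B replaces A's set-building + priority scan + sort-then-scan fallback with one pass that
-- records priority flags and a running lexicographic minimum of prefix-matching keys (alternative decomposition).


-- ===== PORT A =====
-- {k for row in rows for k in row.keys()}, then the SIGNIF_KEYS priority loop (unrolled),
-- then 'for key in sorted(keys): if key.startswith("significant_BH_"): return key', else None.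
def detect_signif_key (rows : List (List (String × String))) : Option String :=
  let keys : PySem.Set String :=
    PySem.Set.ofList (rows.flatMap (fun row => PySem.Dict.keys (PySem.Dict.mk row)))
  if PySem.Set.contains keys "significant_BH_0.05" then some "significant_BH_0.05"
  else if PySem.Set.contains keys "significant_BH_0.1" then some "significant_BH_0.1"
  else if PySem.Set.contains keys "significant_BH" then some "significant_BH"
  else (PySem.List.sorted keys (fun x => x) false).find?
         (fun k => PySem.Str.startswith k "significant_BH_")

-- ===== PORT B =====
-- 'if k.startswith("significant_BH_") and (best is None or k < best): best = k'
def bUpdMin (m : Option String) (k : String) : Option String :=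
  if PySem.Str.startswith k "significant_BH_"
      && (match m with | none => true | some b => decide (k < b)) then some k else m

-- one iteration of B's inner loop body over the state (f05, f01, fbh, best)
def bStep (st : Bool × Bool × Bool × Option String) (k : String) : Bool × Bool × Bool × Option String :=
  ( st.1 || (k == "significant_BH_0.05"),
    st.2.1 || (k == "significant_BH_0.1"),
    st.2.2.1 || (k == "significant_BH"),
    bUpdMin st.2.2.2 k )

def detect_signif_key_alt (rows : List (List (String × String))) : Option String :=
  let st := rows.foldl
    (fun st row => (PySem.Dict.keys (PySem.Dict.mk row)).foldl bStep st)
    (false, false, false, none)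
  if st.1 then some "significant_BH_0.05"
  else if st.2.1 then some "significant_BH_0.1"
  else if st.2.2.1 then some "significant_BH"
  else st.2.2.2

-- ===== PRECONDITION & SPEC =====
def Spec_detect_signif_key (rows : List (List (String × String))) (out : Option String) : Prop := out = detect_signif_key_alt rows
instance (rows : List (List (String × String))) (out : Option String) : Decidable (Spec_detect_signif_key rows out) := by unfold Spec_detect_signif_key; infer_instance

-- ===== CLAIM (what is proved, stated in full; the proofs are below) =====
def Claim_equal_detect_signif_key : Prop := ∀ (rows : List (List (String × String))), Dom_detect_signif_key rows → Spec_detect_signif_key rows (detect_signif_key rows)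

-- ===== LEMMAS AND PROOFS =====

-- the prefix predicate of the fallback
def pPref (k : String) : Bool := PySem.Str.startswith k "significant_BH_"

-- B's fold, componentwise: flags are 'any', best is the bUpdMin fold
theorem bStep_foldl (L : List String) :
    ∀ st : Bool × Bool × Bool × Option String,
    L.foldl bStep st =
      ( st.1 || L.any (· == "significant_BH_0.05"),
        st.2.1 || L.any (· == "significant_BH_0.1"),
        st.2.2.1 || L.any (· == "significant_BH"),
        L.foldl bUpdMin st.2.2.2 ) := by
  induction L with
  | nil => intro st; simp
  | cons k t ih =>
    intro st
    simp [List.foldl_cons, ih, bStep, Bool.or_assoc]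

-- one step of B's running minimum on a prefix-matching key is 'min'
theorem bUpdMin_some_of_pref {k : String} (b : String) (hp : pPref k = true) :
    bUpdMin (some b) k = some (min b k) := by
  simp only [pPref] at hp; simp at hp
  by_cases hlt : k < b
  · simp [bUpdMin, hp, hlt, min_def, not_le.mpr hlt]
  · simp [bUpdMin, hp, hlt, le_of_not_gt hlt]

-- a non-matching key leaves B's running minimum unchanged
theorem bUpdMin_skip {k : String} (m : Option String) (hp : pPref k = false) :
    bUpdMin m k = m := by
  simp only [pPref] at hp; simp at hp
  simp [bUpdMin, hp]

-- the bUpdMin fold from a 'some' accumulator is min over the filtered tail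
theorem bUpdMin_foldl_some (t : List String) :
    ∀ b : String, t.foldl bUpdMin (some b) = some ((t.filter pPref).foldl min b) := by
  induction t with
  | nil => intro b; simp
  | cons k t ih =>
    intro b
    by_cases hp : pPref k
    · rw [List.foldl_cons, bUpdMin_some_of_pref b hp, ih, List.filter_cons_of_pos hp,
        List.foldl_cons]
    · rw [List.foldl_cons, bUpdMin_skip _ (by simpa using hp), ih,
        List.filter_cons_of_neg (by simpa using hp)]

-- the bUpdMin fold from 'none' is min(filtered keys, default=None)
theorem bUpdMin_foldl_none (L : List String) :
    L.foldl bUpdMin none = PySem.List.min? (L.filter pPref) (fun x => x) := by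
  induction L with
  | nil => simp [PySem.List.min?]
  | cons k t ih =>
    by_cases hp : pPref k
    · have h1 : bUpdMin none k = some k := by
        simp only [pPref] at hp; simp at hp; simp [bUpdMin, hp]
      rw [List.foldl_cons, h1, bUpdMin_foldl_some, List.filter_cons_of_pos hp,
        PySem.List.min?_id_cons]
    · rw [List.foldl_cons, bUpdMin_skip _ (by simpa using hp), ih,
        List.filter_cons_of_neg (by simpa using hp)]

-- in a strictly increasing list, find? returns the element that is ≤-minimal among satisfiers
theorem find?_of_sorted_min {s : List String} {p : String → Bool} {m : String}
    (hs : s.Pairwise (· < ·)) (hm : m ∈ s) (hpm : p m = true)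
    (hmin : ∀ y ∈ s, p y = true → m ≤ y) : s.find? p = some m := by
  induction s with
  | nil => cases hm
  | cons h t ih =>
    rcases List.pairwise_cons.mp hs with ⟨hlt, ht⟩
    by_cases hph : p h
    · have : m = h := by
        rcases List.mem_cons.mp hm with hm | hm
        · exact hm
        · exact absurd (hmin h List.mem_cons_self hph) (not_le.mpr (hlt m hm))
      simp [hph, this]
    · have hmt : m ∈ t := by
        rcases List.mem_cons.mp hm with hm | hm
        · exact absurd (hm ▸ hpm) (by simpa using hph)
        · exact hm
      have := ih ht hmt (fun y hy hpy => hmin y (List.mem_cons_of_mem _ hy) hpy)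
      simpa [List.find?_cons, hph] using this

-- A's sorted-scan fallback equals B's running minimum
theorem fallback_eq (L : List String) :
    (PySem.List.sorted (PySem.Set.ofList L) (fun x => x) false).find? pPref
      = PySem.List.min? (L.filter pPref) (fun x => x) := by
  set s := PySem.List.sorted (PySem.Set.ofList L) (fun x => x) false with hsdef
  have hmem : ∀ x : String, x ∈ s ↔ x ∈ L := by
    intro x
    rw [hsdef, PySem.List.mem_sorted, PySem.Set.mem_ofList]
  cases hmin : PySem.List.min? (L.filter pPref) (fun x => x) with
  | none =>
    have hempty := (PySem.List.min?_eq_none_iff _ _).mp hmin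
    apply List.find?_eq_none.mpr
    intro x hx
    have : x ∉ L.filter pPref := by simp [hempty]
    simp only [List.mem_filter] at this
    intro hpx
    exact this ⟨(hmem x).mp hx, hpx⟩
  | some m =>
    have hmmem := PySem.List.min?_mem hmin
    have hmle := PySem.List.min?_isMin hmin
    simp only [List.mem_filter] at hmmem
    exact find?_of_sorted_min
      (hsdef ▸ PySem.List.sorted_ofList_pairwise_lt L)
      ((hmem m).mpr hmmem.1) hmmem.2
      (fun y hy hpy => hmle y (List.mem_filter.mpr ⟨(hmem y).mp hy, hpy⟩))

-- set membership test = any over the flattened key list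
theorem contains_eq_any (L : List String) (x : String) :
    PySem.Set.contains (PySem.Set.ofList L) x = L.any (· == x) := by
  rw [Bool.eq_iff_iff]
  simp only [PySem.Set.contains, List.contains_iff_mem, PySem.Set.mem_ofList,
    List.any_eq_true, beq_iff_eq]
  exact ⟨fun h => ⟨x, h, rfl⟩, fun ⟨y, hy, e⟩ => e ▸ hy⟩

-- ===== VERDICT (by name: the statement is the Claim_ definition above) =====
theorem detect_signif_key_spec : Claim_equal_detect_signif_key := by
  intro rows _
  unfold Spec_detect_signif_key detect_signif_key detect_signif_key_alt
  set L := rows.flatMap (fun row => PySem.Dict.keys (PySem.Dict.mk row)) with hL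
  rw [← List.foldl_flatMap, ← hL, bStep_foldl, bUpdMin_foldl_none]
  simp only [Bool.false_or]
  rw [contains_eq_any, contains_eq_any, contains_eq_any,
    show (fun k => PySem.Str.startswith k "significant_BH_") = pPref from rfl, fallback_eq]
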